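-- pv_equiv track=rewrite | github.com/DongjunLim/algorithm_study | 프로그래머스/예산.py | solution
-- ===== SOURCE A (Python) =====
-- def solution(budgets, M):
--     left = 1
--     right = max(budgets)
--
--     while left <= right:
--         mid = (left + right) // 2
--         budgetSum = 0
--         for budget in budgets:
--             if budget > mid:
--                 budgetSum += mid
--             else:
--                 budgetSum += budget
--         if budgetSum > M:
--             right = mid - 1
--         else:
--             left = mid + 1
--             answer = mid
--
--     return answer
-- ===== SOURCE B (Python) =====
-- def solution(budgets, M):
--     bs = sorted(budgets)
--     n = len(bs)
--     prefix = 0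
--     for i, b in enumerate(bs):
--         remaining = n - i
--         if prefix + b * remaining > M:
--             return (M - prefix) // remaining
--         prefix += b
--     return bs[-1]
-- ===== Notes on version B (the rewrite author's own statement) =====
-- stated objective: faster
-- what changed: A binary-searches the cap over [1, max(budgets)] recomputing the capped sum over the whole list at every step; B sorts once and does a single prefix-sum scan, returning (M - prefix) // remaining at the first element whose uniform cap would overflow M.
import Mathlib
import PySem

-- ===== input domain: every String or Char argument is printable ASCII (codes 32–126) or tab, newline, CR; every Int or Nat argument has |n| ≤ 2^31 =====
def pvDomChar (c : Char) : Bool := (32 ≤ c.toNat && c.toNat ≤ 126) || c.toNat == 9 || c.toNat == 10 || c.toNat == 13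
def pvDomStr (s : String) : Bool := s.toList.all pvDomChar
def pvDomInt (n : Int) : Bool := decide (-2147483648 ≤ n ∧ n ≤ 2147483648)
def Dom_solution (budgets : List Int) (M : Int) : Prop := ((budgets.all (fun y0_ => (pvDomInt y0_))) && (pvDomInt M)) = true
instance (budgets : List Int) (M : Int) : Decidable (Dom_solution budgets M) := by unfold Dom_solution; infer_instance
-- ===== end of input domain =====

-- B replaces A's binary search (O(n log maxBudget)) with one sort + a single pfx-sum scan; return values proved equal on Pre_.

-- ===== PORT A =====
-- inner 'for budget in budgets' loop computing budgetSum for a given mid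
def sumCapped (budgets : List Int) (mid : Int) : Int :=
  budgets.foldl (fun s b => if b > mid then s + mid else s + b) 0

-- the while-loop; answer : Option Int models Python's possibly-unassigned 'answer'
def loopA (budgets : List Int) (M : Int) (left right : Int) (answer : Option Int) : Option Int :=
  if h : left ≤ right then
    let mid := PySem.Int.floordiv (left + right) 2
    if sumCapped budgets mid > M then loopA budgets M left (mid - 1) answer
    else loopA budgets M (mid + 1) right (some mid)
  else answer
termination_by (right + 1 - left).toNat
decreasing_by
  · have := PySem.Int.floordiv_two_mid_bounds h; omega
  · have := PySem.Int.floordiv_two_mid_bounds h; omega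

-- max([]) raises ValueError and an unassigned 'answer' raises NameError: both outside Pre_, marked by .getD 0
def solution (budgets : List Int) (M : Int) : Int :=
  (loopA budgets M 1 ((PySem.List.max? budgets (fun y => y)).getD 0) none).getD 0

-- ===== PORT B =====
-- the for-loop of Source B over the sorted list, carrying pfx and remaining; [] = bs[-1] on empty (raises, outside Pre_)
def altGo (M : Int) (pfx rem : Int) : List Int → Int
  | [] => 0
  | [b] => if pfx + b * rem > M then PySem.Int.floordiv (M - pfx) rem else b
  | b :: b2 :: rest =>
    if pfx + b * rem > M then PySem.Int.floordiv (M - pfx) rem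
    else altGo M (pfx + b) (rem - 1) (b2 :: rest)

def solution_alt (budgets : List Int) (M : Int) : Int :=
  let bs := PySem.List.sorted budgets (fun x => x)
  altGo M 0 (bs.length : Int) bs

-- ===== PRECONDITION & SPEC =====
def capSum (l : List Int) (c : Int) : Int := (l.map (fun b => min b c)).sum

-- Pre_ is exactly where A returns: nonempty list, positive maximum, and the cap-1 sum within M
-- (otherwise Python A raises ValueError on max([]) or finishes without ever assigning 'answer' → NameError).
def Pre_solution (budgets : List Int) (M : Int) : Prop :=
  budgets ≠ [] ∧ 1 ≤ (PySem.List.max? budgets (fun y => y)).getD 0 ∧ capSum budgets 1 ≤ M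
instance (budgets : List Int) (M : Int) : Decidable (Pre_solution budgets M) := by
  unfold Pre_solution; infer_instance

def pvWitness_solution : List Int × Int := ([5, 3], 9)

def Spec_solution (budgets : List Int) (M : Int) (out : Int) : Prop := out = solution_alt budgets M
instance (budgets : List Int) (M : Int) (out : Int) : Decidable (Spec_solution budgets M out) := by unfold Spec_solution; infer_instance

-- ===== CLAIM (what is proved, stated in full; the proofs are below) =====
def Claim_equal_solution : Prop := ∀ (budgets : List Int) (M : Int), Dom_solution budgets M → Pre_solution budgets M → Spec_solution budgets M (solution budgets M)
-- ===== LEMMAS AND PROOFS =====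

theorem capSum_cons (b : Int) (l : List Int) (c : Int) :
    capSum (b :: l) c = min b c + capSum l c := by simp [capSum]

theorem sumCapped_eq_aux (c : Int) (l : List Int) (a : Int) :
    l.foldl (fun s b => if b > c then s + c else s + b) a = a + capSum l c := by
  induction l generalizing a with
  | nil => simp [capSum]
  | cons b t ih =>
    simp only [List.foldl_cons, ih, capSum_cons]
    by_cases hb : b > c
    · simp [hb, le_of_lt hb]; omega
    · simp [hb, min_def]; omega

theorem sumCapped_eq (l : List Int) (c : Int) : sumCapped l c = capSum l c := by
  simpa using sumCapped_eq_aux c l 0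

theorem capSum_mono (l : List Int) {c c' : Int} (h : c ≤ c') : capSum l c ≤ capSum l c' := by
  induction l with
  | nil => simp [capSum]
  | cons b t ih =>
    rw [capSum_cons, capSum_cons]
    have : min b c ≤ min b c' := by omega
    omega

theorem capSum_perm {l l' : List Int} (h : l.Perm l') (c : Int) : capSum l c = capSum l' c :=
  List.Perm.sum_eq (List.Perm.map _ h)

theorem capSum_of_le (l : List Int) (c : Int) (h : ∀ b ∈ l, c ≤ b) :
    capSum l c = (l.length : Int) * c := by
  induction l with
  | nil => simp [capSum]
  | cons b t ih =>
    rw [capSum_cons, ih (fun x hx => h x (by simp [hx]))]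
    have hb := h b (by simp)
    have : min b c = c := by omega
    simp [this]; ring

-- the unique value both loops compute: largest cap in [1, mx] whose capped sum stays ≤ M
def IsAns (budgets : List Int) (M mx c : Int) : Prop :=
  1 ≤ c ∧ c ≤ mx ∧ capSum budgets c ≤ M ∧ (c = mx ∨ M < capSum budgets (c + 1))

theorem IsAns_unique {budgets : List Int} {M mx c c' : Int}
    (h : IsAns budgets M mx c) (h' : IsAns budgets M mx c') : c = c' := by
  obtain ⟨h1, h2, h3, h4⟩ := h; obtain ⟨h1', h2', h3', h4'⟩ := h'
  by_contra hne
  rcases lt_or_gt_of_ne hne with hlt | hlt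
  · rcases h4 with rfl | h4
    · omega
    · have := capSum_mono budgets (show c + 1 ≤ c' by omega); omega
  · rcases h4' with rfl | h4'
    · omega
    · have := capSum_mono budgets (show c' + 1 ≤ c by omega); omega

theorem loopA_spec (budgets : List Int) (M mx : Int)
    (hmx : 1 ≤ mx) (h1 : capSum budgets 1 ≤ M) :
    ∀ n (l r : Int) (ans : Option Int), (r + 1 - l).toNat = n →
    1 ≤ l → l ≤ r + 1 → r ≤ mx →
    (l = 1 ∨ capSum budgets (l - 1) ≤ M) →
    (r = mx ∨ M < capSum budgets (r + 1)) →
    (ans = if l = 1 then none else some (l - 1)) →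
    ∃ c, loopA budgets M l r ans = some c ∧ IsAns budgets M mx c := by
  intro n
  induction n using Nat.strong_induction_on with
  | _ n ih =>
    intro l r ans hn hl1 hlr hrmx hleft hright hans
    rw [loopA]
    by_cases h : l ≤ r
    · simp only [h, dif_pos]
      have hmid := PySem.Int.floordiv_two_mid_bounds h
      set mid := PySem.Int.floordiv (l + r) 2 with hmiddef
      rw [sumCapped_eq]
      by_cases hs : capSum budgets mid > M
      · simp only [hs, if_pos]
        exact ih ((mid - 1) + 1 - l).toNat (by omega) l (mid - 1) ans (by omega)
          hl1 (by omega) (by omega) hleft (Or.inr (by simpa using hs)) hans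
      · rw [if_neg hs]
        exact ih (r + 1 - (mid + 1)).toNat (by omega) (mid + 1) r (some mid) (by omega)
          (by omega) (by omega) hrmx (Or.inr (by simpa using hs)) hright
          (by simp only [if_neg (by omega : ¬ mid + 1 = 1)]; congr 1; omega)
    · rw [dif_neg h]
      -- at exit l = r + 1; l = 1 is impossible: then r = 0 < mx forces M < capSum 1
      have hl2 : 2 ≤ l := by
        by_contra hc
        have hl : l = 1 := by omega
        rcases hright with hr | hr
        · omega
        · have : r + 1 = 1 := by omega
          rw [this] at hr; omega
      refine ⟨l - 1, by simp [hans, if_neg (by omega : ¬ l = 1)], ?_, by omega, ?_, ?_⟩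
      · omega
      · rcases hleft with hl | hl
        · omega
        · exact hl
      · rcases hright with hr | hr
        · exact Or.inl (by omega)
        · refine Or.inr ?_
          have hto : l - 1 + 1 = r + 1 := by omega
          rw [hto]; exact hr

theorem foldr_min_le (l : List Int) (a b : Int) (h : b ∈ l) : l.foldr min a ≤ b := by
  induction l with
  | nil => simp at h
  | cons x t ih =>
    rcases List.mem_cons.mp h with rfl | ht
    · exact min_le_left _ _
    · exact le_trans (min_le_right _ _) (ih ht)

theorem altGo_spec (budgets : List Int) (M : Int) :
    ∀ (bs : List Int) (pfx lb : Int) (hne : bs ≠ []),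
    bs.Pairwise (· ≤ ·) →
    (∀ b ∈ bs, lb ≤ b) →
    (∀ c, lb ≤ c → capSum budgets c = pfx + capSum bs c) →
    pfx + lb * (bs.length : Int) ≤ M →
    ∃ c, altGo M pfx (bs.length : Int) bs = c ∧
      capSum budgets c ≤ M ∧ c ≤ bs.getLast hne ∧
      (c = bs.getLast hne ∨ M < capSum budgets (c + 1)) := by
  intro bs
  induction bs with
  | nil => intro _ _ h; exact absurd rfl h
  | cons b rest ih =>
    intro pfx lb _ hpw hlb hsplit hlbM
    have hrem : (0:Int) < (((b :: rest).length : Nat) : Int) := by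
      simp only [List.length_cons]; push_cast; omega
    set rem : Int := (((b :: rest).length : Nat) : Int) with hremdef
    by_cases hbrk : pfx + b * rem > M
    · -- early return: cap = (M - pfx) // rem
      set cap : Int := PySem.Int.floordiv (M - pfx) rem with hcapdef
      have hcap1 : cap * rem ≤ M - pfx :=
        (PySem.Int.le_floordiv_iff_mul_le hrem).mp le_rfl
      have hcap2 : M - pfx < (cap + 1) * rem :=
        (PySem.Int.floordiv_lt_iff_lt_mul hrem).mp (by omega)
      have hlbcap : lb ≤ cap :=
        (PySem.Int.le_floordiv_iff_mul_le hrem).mpr (by omega)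
      have hcapb : cap < b := by nlinarith
      have hble : ∀ x ∈ (b :: rest), cap + 1 ≤ x := by
        intro x hx
        rcases List.mem_cons.mp hx with rfl | hx
        · omega
        · have := (List.pairwise_cons.mp hpw).1 x hx; omega
      have hgcap : capSum (b :: rest) cap = rem * cap := by
        rw [hremdef]; exact capSum_of_le _ _ (fun x hx => by have := hble x hx; omega)
      have hgcap' : capSum (b :: rest) (cap + 1) = rem * (cap + 1) := by
        rw [hremdef]; exact capSum_of_le _ _ hble
      have hlast : cap < (b :: rest).getLast (by simp) := by
        have := hble _ (List.getLast_mem (l := b :: rest) (by simp)); omega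
      refine ⟨cap, ?_, ?_, by omega, Or.inr ?_⟩
      · cases rest with
        | nil => simp only [altGo, if_pos hbrk]; exact hcapdef.symm
        | cons b2 r2 => simp only [altGo, if_pos hbrk]; exact hcapdef.symm
      · rw [hsplit cap hlbcap, hgcap]; nlinarith
      · rw [hsplit (cap + 1) (by omega), hgcap']; nlinarith
    · push_neg at hbrk
      cases rest with
      | nil =>
        refine ⟨b, ?_, ?_, le_refl _, Or.inl rfl⟩
        · simp only [altGo]
          rw [if_neg (not_lt.mpr hbrk)]
        · have hb1 : capSum [b] b = b := by simp [capSum]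
          have h1 : rem = 1 := by rw [hremdef]; simp
          rw [hsplit b (hlb b (by simp)), hb1]
          rw [h1] at hbrk; omega
      | cons b2 r2 =>
        have hstep : altGo M pfx rem (b :: b2 :: r2) = altGo M (pfx + b) (rem - 1) (b2 :: r2) := by
          simp only [altGo]; rw [if_neg (not_lt.mpr hbrk)]
        have hrem' : rem - 1 = (((b2 :: r2).length : Nat) : Int) := by
          rw [hremdef]; simp only [List.length_cons]; push_cast; ring
        have hpw' := (List.pairwise_cons.mp hpw).2
        have hble' := (List.pairwise_cons.mp hpw).1
        obtain ⟨c, hc, hc1, hc2, hc3⟩ := ih (pfx + b) b (by simp) hpw'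
          (fun x hx => hble' x hx)
          (fun c hcge => by
            rw [hsplit c (le_trans (hlb b (by simp)) hcge), capSum_cons]
            have hmin : min b c = b := by omega
            rw [hmin]; ring)
          (by rw [← hrem']
              have hbl : lb ≤ b := hlb b (by simp)
              nlinarith)
        refine ⟨c, ?_, hc1, ?_, ?_⟩
        · rw [hstep, hrem', hc]
        · simpa [List.getLast_cons] using hc2
        · simpa [List.getLast_cons] using hc3

theorem max_eq_getLast_sorted (budgets : List Int) (h : budgets ≠ []) :
    (PySem.List.max? budgets (fun y => y)).getD 0
      = (PySem.List.sorted budgets (fun x => x)).getLast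
          (by simpa [PySem.List.sorted_eq_nil_iff] using h) := by
  obtain ⟨m, hm⟩ : ∃ m, PySem.List.max? budgets (fun y => y) = some m := by
    cases hmx : PySem.List.max? budgets (fun y => y) with
    | none => exact absurd (((PySem.List.max?_eq_none_iff _ _).mp hmx)) h
    | some m => exact ⟨m, rfl⟩
  have hmem := PySem.List.max?_mem hm
  have hmax := PySem.List.max?_isMax hm
  set bs := PySem.List.sorted budgets (fun x => x) with hbs
  have hbsne : bs ≠ [] := by simpa [hbs, PySem.List.sorted_eq_nil_iff] using h
  have hperm : bs.Perm budgets := PySem.List.sorted_perm budgets _ _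
  have hlmem : bs.getLast hbsne ∈ budgets := hperm.mem_iff.mp (List.getLast_mem hbsne)
  have hpw : bs.Pairwise (· ≤ ·) := by
    simpa using PySem.List.sorted_pairwise budgets (fun x => x)
  -- getLast is ≥ every element of bs
  have hlast_max : ∀ x ∈ bs, x ≤ bs.getLast hbsne := by
    intro x hx
    rcases List.mem_iff_getElem.mp hx with ⟨i, hi, rfl⟩
    have hL : bs.getLast hbsne = bs[bs.length - 1]'(by omega) := List.getLast_eq_getElem hbsne
    rw [hL]
    rcases Nat.lt_or_ge i (bs.length - 1) with hlt | hge
    · exact List.pairwise_iff_getElem.mp hpw i (bs.length - 1) hi (by omega) hlt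
    · have : i = bs.length - 1 := by omega
      subst this; exact le_refl _
  rw [hm]
  exact le_antisymm (hlast_max m (hperm.mem_iff.mpr hmem))
    (by simpa using hmax _ (hperm.mem_iff.mp (List.getLast_mem hbsne)))

-- ===== VERDICT (by name: the statement is the Claim_ definition above) =====
theorem solution_spec : Claim_equal_solution := by
  intro budgets M _ hpre
  obtain ⟨hne, hmx1, hcap1⟩ := hpre
  unfold Spec_solution
  set mx := (PySem.List.max? budgets (fun y => y)).getD 0 with hmxdef
  -- A side
  obtain ⟨cA, hcA, hAns⟩ := loopA_spec budgets M mx hmx1 hcap1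
    (mx + 1 - 1).toNat 1 mx none rfl (by omega) (by omega) (by omega)
    (Or.inl rfl) (Or.inl rfl) (by simp)
  -- B side
  set bs := PySem.List.sorted budgets (fun x => x) with hbs
  have hbsne : bs ≠ [] := by simpa [hbs, PySem.List.sorted_eq_nil_iff] using hne
  have hperm : bs.Perm budgets := PySem.List.sorted_perm budgets _ _
  have hpw : bs.Pairwise (· ≤ ·) := by simpa using PySem.List.sorted_pairwise budgets (fun x => x)
  -- lb := min of (1, all elements)
  set lb : Int := min 1 (bs.foldr min 1) with hlbdef
  have hlb_le_all : ∀ b ∈ bs, lb ≤ b := fun b hbmem =>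
    le_trans (min_le_right _ _) (foldr_min_le bs 1 b hbmem)
  have hlb1 : lb ≤ 1 := min_le_left _ _
  have hsplit : ∀ c, lb ≤ c → capSum budgets c = 0 + capSum bs c := by
    intro c _; rw [capSum_perm hperm.symm c]; ring
  have hlbn : (0:Int) + lb * (bs.length : Int) ≤ M := by
    have h1 : capSum bs lb = (bs.length : Int) * lb := capSum_of_le bs lb hlb_le_all
    have h2 : capSum bs lb ≤ capSum bs 1 := capSum_mono bs hlb1
    have h3 : capSum bs 1 = capSum budgets 1 := capSum_perm hperm 1
    have h4 : lb * (bs.length : Int) = (bs.length : Int) * lb := mul_comm _ _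
    omega
  obtain ⟨cB, hcB, hB1, hB2, hB3⟩ := altGo_spec budgets M bs 0 lb hbsne hpw hlb_le_all hsplit hlbn
  have hmxlast : mx = bs.getLast hbsne := by
    rw [hmxdef, max_eq_getLast_sorted budgets hne]
  have hcB1 : 1 ≤ cB := by
    rcases hB3 with h | h
    · rw [← hmxlast] at h; omega
    · by_contra hc
      have : cB + 1 ≤ 1 := by omega
      have := capSum_mono budgets this
      omega
  have hBans : IsAns budgets M mx cB :=
    ⟨hcB1, by rw [hmxlast]; exact hB2, hB1, by rw [hmxlast]; exact hB3⟩
  have : cA = cB := IsAns_unique hAns hBans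
  show solution budgets M = solution_alt budgets M
  rw [solution, solution_alt]
  rw [← hmxdef, ← hbs, hcA, hcB, this]
  rfl
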